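-- pv_equiv track=rewrite | github.com/techdubb/advent-of-code | 2023/13/solve1.py | find_fold
-- ===== SOURCE A (Python) =====
-- def find_fold(m):
--     for i in range(1, len(m)):
--         above = m[:i]
--         below = m[i:]
--
--         above.reverse()
--         min_len = min([len(above), len(below)])
--
--         if above[:min_len] == below[:min_len]:
--             return i
-- ===== SOURCE B (Python) =====
-- def find_fold(m):
--     # Assign each distinct row a small integer id via a dict built in one pass,
--     # then test each candidate fold line with an inward two-pointer scan on ids.
--     ids = []
--     first = {}
--     for r in m:
--         if r not in first:
--             first[r] = len(first)
--         ids.append(first[r])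
--     n = len(m)
--     for i in range(1, n):
--         k = min(i, n - i)
--         j = 0
--         while j < k and ids[i - 1 - j] == ids[i + j]:
--             j += 1
--         if j == k:
--             return i
-- ===== Notes on version B (the rewrite author's own statement) =====
-- stated objective: faster
-- what changed: B replaces A's per-candidate slice/reverse/compare of row lists by a one-pass dict that maps each distinct row to an int id, then tests each fold line with an inward two-pointer scan over the ids, so no lists are copied and row comparisons become int comparisons.
import Mathlib
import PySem

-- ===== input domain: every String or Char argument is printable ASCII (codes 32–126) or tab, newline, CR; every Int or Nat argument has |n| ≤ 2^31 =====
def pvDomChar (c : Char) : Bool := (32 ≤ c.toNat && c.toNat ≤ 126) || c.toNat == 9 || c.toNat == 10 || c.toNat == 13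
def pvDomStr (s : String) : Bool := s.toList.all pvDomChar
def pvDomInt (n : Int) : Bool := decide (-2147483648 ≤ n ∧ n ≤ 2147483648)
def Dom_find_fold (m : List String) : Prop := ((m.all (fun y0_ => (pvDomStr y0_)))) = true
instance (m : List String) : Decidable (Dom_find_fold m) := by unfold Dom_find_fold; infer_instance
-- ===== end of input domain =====

-- B replaces A's per-candidate slice/reverse/compare of row lists by a one-pass dict of
-- row ids plus an inward two-pointer scan per candidate (objective: faster).

-- ===== PORT A =====
def findFoldGoA (m : List String) : List Int → Option Int
  | [] => none
  | i :: rest =>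
    let above := (PySem.List.slice m none (some i)).reverse
    let below := PySem.List.slice m (some i) none
    let min_len : Int := min (above.length : Int) (below.length : Int)
    if PySem.List.slice above none (some min_len) = PySem.List.slice below none (some min_len)
    then some i else findFoldGoA m rest

def find_fold (m : List String) : Option Int :=
  findFoldGoA m (PySem.List.pyRange 1 (m.length : Int) 1)

-- ===== PORT B =====
-- the 'for r in m' loop building the dict 'first' and the list 'ids'
def buildIdsGo : List String → PySem.Dict String Int → List Int → List Int
  | [], _first, ids => ids
  | r :: rest, first, ids =>
    let first' := if first.contains r then first else first.insert r (first.size : Int)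
    buildIdsGo rest first' (ids ++ [first'.getD r 0])

-- the 'while j < k and ids[i-1-j] == ids[i+j]' loop; returns the final j
def checkGo (ids : List Int) (i k j : Int) : Int :=
  if j < k then
    if PySem.List.pyGetD ids (i - 1 - j) 0 = PySem.List.pyGetD ids (i + j) 0
    then checkGo ids i k (j + 1) else j
  else j
termination_by (k - j).toNat
decreasing_by omega

def findFoldGoB (ids : List Int) (n : Int) : List Int → Option Int
  | [] => none
  | i :: rest =>
    let k := min i (n - i)
    if checkGo ids i k 0 = k then some i else findFoldGoB ids n rest

def find_fold_alt (m : List String) : Option Int :=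
  let ids := buildIdsGo m PySem.Dict.empty []
  findFoldGoB ids (m.length : Int) (PySem.List.pyRange 1 (m.length : Int) 1)

-- ===== PRECONDITION & SPEC =====
def Spec_find_fold (m : List String) (out : Option Int) : Prop := out = find_fold_alt m
instance (m : List String) (out : Option Int) : Decidable (Spec_find_fold m out) := by unfold Spec_find_fold; infer_instance

-- ===== CLAIM (what is proved, stated in full; the proofs are below) =====
def Claim_equal_find_fold : Prop := ∀ (m : List String), Dom_find_fold m → Spec_find_fold m (find_fold m)

-- ===== LEMMAS AND PROOFS =====

-- dict evolution of buildIdsGo, in isolation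
def dictGo : List String → PySem.Dict String Int → PySem.Dict String Int
  | [], d => d
  | r :: rest, d => dictGo rest (if d.contains r then d else d.insert r (d.size : Int))

theorem contains_dictGo_of_contains (l : List String) (d : PySem.Dict String Int) (r : String)
    (h : d.contains r = true) : (dictGo l d).contains r = true := by
  induction l generalizing d with
  | nil => exact h
  | cons s rest ih =>
    simp only [dictGo]
    apply ih
    split
    · exact h
    · simp [PySem.Dict.contains_insert, h]

theorem contains_dictGo_of_mem (l : List String) (d : PySem.Dict String Int) (r : String)
    (h : r ∈ l) : (dictGo l d).contains r = true := by
  induction l generalizing d with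
  | nil => cases h
  | cons s rest ih =>
    simp only [dictGo]
    rcases List.mem_cons.mp h with rfl | hm
    · apply contains_dictGo_of_contains
      split
      · assumption
      · exact PySem.Dict.contains_insert_self _ _ _
    · exact ih _ hm

theorem getD_dictGo_of_contains (l : List String) (d : PySem.Dict String Int) (r : String)
    (h : d.contains r = true) : (dictGo l d).getD r 0 = d.getD r 0 := by
  induction l generalizing d with
  | nil => rfl
  | cons s rest ih =>
    simp only [dictGo]
    split
    · exact ih _ h
    · rename_i hs
      have hne : r ≠ s := by rintro rfl; exact hs h
      rw [ih _ (by simp [PySem.Dict.contains_insert, h]), PySem.Dict.getD_insert,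
        if_neg hne]

theorem buildIdsGo_eq (l : List String) (d : PySem.Dict String Int) (acc : List Int) :
    buildIdsGo l d acc = acc ++ l.map (fun r => (dictGo l d).getD r 0) := by
  induction l generalizing d acc with
  | nil => simp [buildIdsGo]
  | cons r rest ih =>
    simp only [buildIdsGo, dictGo, List.map_cons]
    rw [ih]
    have hcont : ∀ d' : PySem.Dict String Int, d'.contains r = true →
        (dictGo rest d').getD r 0 = d'.getD r 0 := fun d' h => getD_dictGo_of_contains _ _ _ h
    split
    · rename_i h
      rw [hcont d h]
      simp
    · rw [hcont _ (PySem.Dict.contains_insert_self _ _ _)]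
      simp

-- invariant: ids stored in the dict are injective and bounded by the size
def DInv (d : PySem.Dict String Int) : Prop :=
  (∀ r, d.contains r = true → 0 ≤ d.getD r 0 ∧ d.getD r 0 < (d.size : Int)) ∧
  (∀ r s, d.contains r = true → d.contains s = true → d.getD r 0 = d.getD s 0 → r = s)

theorem dinv_dictGo (l : List String) (d : PySem.Dict String Int) (hd : DInv d) :
    DInv (dictGo l d) := by
  induction l generalizing d with
  | nil => exact hd
  | cons x rest ih =>
    simp only [dictGo]
    split
    · exact ih _ hd
    · rename_i hx
      apply ih
      obtain ⟨hb, hinj⟩ := hd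
      constructor
      · intro r hr
        rw [PySem.Dict.contains_insert] at hr
        rw [PySem.Dict.getD_insert, PySem.Dict.size_insert, if_neg hx]
        by_cases hrx : r = x
        · rw [if_pos hrx]; push_cast; omega
        · rw [if_neg hrx]
          simp [hrx] at hr
          have := hb r (by simpa using hr)
          push_cast at this ⊢; omega
      · intro r s hr hs heq
        rw [PySem.Dict.contains_insert] at hr hs
        rw [PySem.Dict.getD_insert, PySem.Dict.getD_insert] at heq
        by_cases hrx : r = x <;> by_cases hsx : s = x
        · rw [hrx, hsx]
        · rw [if_pos hrx, if_neg hsx] at heq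
          simp [hsx] at hs
          have := hb s (by simpa using hs)
          omega
        · rw [if_neg hrx, if_pos hsx] at heq
          simp [hrx] at hr
          have := hb r (by simpa using hr)
          omega
        · rw [if_neg hrx, if_neg hsx] at heq
          simp [hrx, hsx] at hr hs
          exact hinj r s (by simpa using hr) (by simpa using hs) heq

-- the final id assignment is injective on rows of m
theorem rowId_inj (m : List String) (a b : String) (ha : a ∈ m) (hb : b ∈ m) :
    (dictGo m PySem.Dict.empty).getD a 0 = (dictGo m PySem.Dict.empty).getD b 0 ↔ a = b := by
  constructor
  · intro h
    have hinv : DInv (dictGo m PySem.Dict.empty) := by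
      apply dinv_dictGo
      constructor
      · intro r hr; rw [PySem.Dict.contains_empty] at hr; cases hr
      · intro r s hr; rw [PySem.Dict.contains_empty] at hr; cases hr
    exact hinv.2 a b (contains_dictGo_of_mem _ _ _ ha) (contains_dictGo_of_mem _ _ _ hb) h
  · rintro rfl; rfl

-- the while loop reaches k iff all the compared pairs agree
theorem checkGo_eq_k_iff (ids : List Int) (i k : Int) : ∀ (j : Int), j ≤ k →
    (checkGo ids i k j = k ↔
      ∀ t : Int, j ≤ t → t < k →
        PySem.List.pyGetD ids (i - 1 - t) 0 = PySem.List.pyGetD ids (i + t) 0) := by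
  have main : ∀ fuel : Nat, ∀ j : Int, (k - j).toNat ≤ fuel → j ≤ k →
      (checkGo ids i k j = k ↔
        ∀ t : Int, j ≤ t → t < k →
          PySem.List.pyGetD ids (i - 1 - t) 0 = PySem.List.pyGetD ids (i + t) 0) := by
    intro fuel
    induction fuel with
    | zero =>
      intro j hf hj
      have hjk : j = k := by omega
      rw [checkGo, if_neg (by omega)]
      constructor
      · intro _ t ht1 ht2; omega
      · intro _; exact hjk
    | succ n ih =>
      intro j hf hj
      rw [checkGo]
      by_cases h1 : j < k
      · rw [if_pos h1]
        by_cases h2 : PySem.List.pyGetD ids (i - 1 - j) 0 = PySem.List.pyGetD ids (i + j) 0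
        · rw [if_pos h2, ih (j + 1) (by omega) (by omega)]
          constructor
          · intro hall t ht1 ht2
            by_cases htj : t = j
            · rw [htj]; exact h2
            · exact hall t (by omega) ht2
          · intro hall t ht1 ht2
            exact hall t (by omega) ht2
        · rw [if_neg h2]
          constructor
          · intro hjk; omega
          · intro hall; exact absurd (hall j le_rfl h1) h2
      · rw [if_neg h1]
        have hjk : j = k := by omega
        constructor
        · intro _ t ht1 ht2; omega
        · intro _; exact hjk
  intro j hj
  exact main (k - j).toNat j le_rfl hj

-- A's per-candidate test ↔ pointwise equality of rows around the fold line
theorem slice_cond_iff (m : List String) (a L : Nat) (hL1 : L ≤ a) (hL2 : L ≤ m.length - a)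
    (ha : a ≤ m.length) :
    ((m.take a).reverse.take L = (m.drop a).take L ↔
      ∀ j : Nat, j < L → m.getD (a - 1 - j) "" = m.getD (a + j) "") := by
  have hlen1 : ((m.take a).reverse.take L).length = L := by
    simp; omega
  have hlen2 : ((m.drop a).take L).length = L := by
    simp; omega
  have hget1 : ∀ (j : Nat) (hj : j < L), ((m.take a).reverse.take L)[j]'(by omega) =
      m.getD (a - 1 - j) "" := by
    intro j hj
    rw [List.getElem_take, List.getElem_reverse, List.getElem_take,
      List.getD_eq_getElem m "" (by omega)]
    congr 1
    simp
    omega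
  have hget2 : ∀ (j : Nat) (hj : j < L), ((m.drop a).take L)[j]'(by omega) =
      m.getD (a + j) "" := by
    intro j hj
    rw [List.getElem_take, List.getElem_drop,
      List.getD_eq_getElem m "" (by omega)]
  constructor
  · intro heq j hj
    rw [← hget1 j hj, ← hget2 j hj]
    congr 1
  · intro hall
    apply List.ext_getElem (by omega)
    intro j hj1 hj2
    rw [hget1 j (by omega), hget2 j (by omega)]
    exact hall j (by omega)

-- per-candidate equivalence: A's slice test ↔ B's two-pointer scan reaching k
theorem cond_iff (m : List String) (i : Int) (h1 : 1 ≤ i) (h2 : i < (m.length : Int)) :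
    (PySem.List.slice ((PySem.List.slice m none (some i)).reverse) none
        (some (min (((PySem.List.slice m none (some i)).reverse.length : Int))
                   ((PySem.List.slice m (some i) none).length : Int)))
      = PySem.List.slice (PySem.List.slice m (some i) none) none
        (some (min (((PySem.List.slice m none (some i)).reverse.length : Int))
                   ((PySem.List.slice m (some i) none).length : Int)))
     ↔ checkGo (buildIdsGo m PySem.Dict.empty []) i (min i ((m.length : Int) - i)) 0
        = min i ((m.length : Int) - i)) := by
  obtain ⟨a, rfl⟩ : ∃ a : Nat, i = (a : Int) := ⟨i.toNat, (Int.toNat_of_nonneg (by omega)).symm⟩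
  have ha1 : 1 ≤ a := by exact_mod_cast h1
  have ha2 : a < m.length := by exact_mod_cast h2
  rw [PySem.List.slice_to m (by omega), PySem.List.slice_from m (by omega)]
  simp only [Int.toNat_natCast, List.length_reverse, List.length_take, List.length_drop]
  have hta : min a m.length = a := by omega
  rw [hta]
  have hmin : min ((a : Nat) : Int) ((m.length - a : Nat) : Int) =
      ((min a (m.length - a) : Nat) : Int) := by push_cast; omega
  rw [hmin]
  rw [PySem.List.slice_to _ (by positivity), PySem.List.slice_to _ (by positivity)]
  simp only [Int.toNat_natCast]
  rw [slice_cond_iff m a (min a (m.length - a)) (by omega) (by omega) (by omega)]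
  have hk : min ((a : Nat) : Int) ((m.length : Int) - a) =
      ((min a (m.length - a) : Nat) : Int) := by push_cast; omega
  rw [hk, checkGo_eq_k_iff _ _ _ 0 (by positivity)]
  -- pointwise bridge between rows and ids
  have hids : buildIdsGo m PySem.Dict.empty [] =
      m.map (fun r => (dictGo m PySem.Dict.empty).getD r 0) := by
    simpa using buildIdsGo_eq m PySem.Dict.empty []
  have hpt : ∀ (p : Nat) (hp : p < m.length),
      PySem.List.pyGetD (buildIdsGo m PySem.Dict.empty []) ((p : Nat) : Int) 0 =
        (dictGo m PySem.Dict.empty).getD (m[p]'hp) 0 := by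
    intro p hp
    rw [hids, PySem.List.pyGetD_natCast,
      List.getD_eq_getElem _ _ (by simpa using hp), List.getElem_map]
  set L : Nat := min a (m.length - a) with hLdef
  constructor
  · intro hall t ht0 htL
    have htL' : t.toNat < L := by omega
    rw [show ((a : Nat) : Int) - 1 - t = ((a - 1 - t.toNat : Nat) : Int) by omega,
      show ((a : Nat) : Int) + t = ((a + t.toNat : Nat) : Int) by omega,
      hpt _ (by omega), hpt _ (by omega)]
    have hgd := hall t.toNat htL'
    rw [List.getD_eq_getElem m "" (by omega), List.getD_eq_getElem m "" (by omega)] at hgd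
    rw [hgd]
  · intro hall j hj
    have h1 := hall (j : Int) (by omega) (by omega)
    rw [show ((a : Nat) : Int) - 1 - (j : Int) = ((a - 1 - j : Nat) : Int) by omega,
      show ((a : Nat) : Int) + (j : Int) = ((a + j : Nat) : Int) by omega,
      hpt _ (by omega), hpt _ (by omega)] at h1
    have hge := (rowId_inj m _ _ (List.getElem_mem _) (List.getElem_mem _)).mp h1
    rw [List.getD_eq_getElem m "" (by omega), List.getD_eq_getElem m "" (by omega)]
    exact hge

theorem loop_eq (m : List String) (l : List Int)
    (h : ∀ i ∈ l, 1 ≤ i ∧ i < (m.length : Int)) :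
    findFoldGoA m l = findFoldGoB (buildIdsGo m PySem.Dict.empty []) (m.length : Int) l := by
  induction l with
  | nil => rfl
  | cons i rest ih =>
    obtain ⟨h1, h2⟩ := h i (List.mem_cons_self ..)
    simp only [findFoldGoA, findFoldGoB]
    have hcond := cond_iff m i h1 h2
    by_cases hc : checkGo (buildIdsGo m PySem.Dict.empty []) i
        (min i ((m.length : Int) - i)) 0 = min i ((m.length : Int) - i)
    · rw [if_pos (hcond.mpr hc), if_pos hc]
    · rw [if_neg (fun hh => hc (hcond.mp hh)), if_neg hc]
      exact ih (fun x hx => h x (List.mem_cons_of_mem _ hx))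

-- ===== VERDICT (by name: the statement is the Claim_ definition above) =====
theorem find_fold_spec : Claim_equal_find_fold := by
  intro m _
  unfold Spec_find_fold find_fold find_fold_alt
  exact loop_eq m _ (fun i hi => by
    rcases PySem.List.mem_pyRange_one.mp hi with ⟨h1, h2⟩; exact ⟨h1, h2⟩)
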